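-- pv_equiv track=rewrite | github.com/fiufit/gateway | src/middlewares/cors.py | get_origin_list
-- ===== SOURCE A (Python) =====
-- def get_origin_list(allowed_origins):
--     if allowed_origins == []:
--         return ["*"]
--     if None not in allowed_origins:
--         return allowed_origins
--     if all(elem is None for elem in allowed_origins):
--         return ["*"]
--     return [elem for elem in allowed_origins if elem is not None]
-- ===== SOURCE B (Python) =====
-- def get_origin_list(allowed_origins):
--     # One forward pass with an Optional accumulator: kept stays None until the
--     # first real origin is seen, so the default case is the accumulator's final
--     # None state rather than a branch analysis over the whole list.
--     kept = None
--     for e in allowed_origins: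
--         if e is not None:
--             if kept is None:
--                 kept = []
--             kept.append(e)
--     return ["*"] if kept is None else kept
-- ===== Notes on version B (the rewrite author's own statement) =====
-- stated objective: alternative
-- what changed: Replaces A's four staged scans (emptiness test, None-membership scan, all-None scan, filtering comprehension) by one explicit forward loop maintaining an Optional accumulator that stays None until a real origin is seen; the default arises from the accumulator's final None state instead of branch analysis.
import Mathlib
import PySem

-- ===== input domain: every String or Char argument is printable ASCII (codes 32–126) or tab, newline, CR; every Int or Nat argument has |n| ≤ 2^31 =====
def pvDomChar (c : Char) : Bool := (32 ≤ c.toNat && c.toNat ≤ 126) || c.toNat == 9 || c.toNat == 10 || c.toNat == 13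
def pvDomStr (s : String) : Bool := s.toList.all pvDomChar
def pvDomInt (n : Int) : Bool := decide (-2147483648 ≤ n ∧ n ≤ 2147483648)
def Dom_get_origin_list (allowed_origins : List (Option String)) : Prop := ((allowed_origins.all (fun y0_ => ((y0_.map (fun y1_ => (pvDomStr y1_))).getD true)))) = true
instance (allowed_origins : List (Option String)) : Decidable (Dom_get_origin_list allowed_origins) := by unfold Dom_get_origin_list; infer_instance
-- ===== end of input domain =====

-- B replaces A's four staged scans by one forward loop with an Optional accumulator (alternative decomposition; return value only — A may return the input list object itself, B always returns a fresh list).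

-- ===== PORT A =====
-- A's second branch returns the input list itself; under the convention (no None present ⇒
-- every element is 'some'), returning it as a List String is filterMap id, element for element.
def get_origin_list (allowed_origins : List (Option String)) : List String :=
  if allowed_origins = [] then ["*"]
  else if !(allowed_origins.contains none) then allowed_origins.filterMap id
  else if allowed_origins.all (fun elem => elem.isNone) then ["*"]
  else allowed_origins.filterMap id

-- ===== PORT B =====
-- Source B's loop body: accumulator stays none until the first kept origin.
def pvKeepStep (acc : Option (List String)) (e : Option String) : Option (List String) :=
  match e with
  | none => acc
  | some s => some (acc.getD [] ++ [s])

def get_origin_list_alt (allowed_origins : List (Option String)) : List String :=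
  match allowed_origins.foldl pvKeepStep none with
  | none => ["*"]
  | some kept => kept

-- ===== PRECONDITION & SPEC =====
def Spec_get_origin_list (allowed_origins : List (Option String)) (out : List String) : Prop := out = get_origin_list_alt allowed_origins
instance (allowed_origins : List (Option String)) (out : List String) : Decidable (Spec_get_origin_list allowed_origins out) := by unfold Spec_get_origin_list; infer_instance

-- ===== CLAIM (what is proved, stated in full; the proofs are below) =====
def Claim_equal_get_origin_list : Prop := ∀ (allowed_origins : List (Option String)), Dom_get_origin_list allowed_origins → Spec_get_origin_list allowed_origins (get_origin_list allowed_origins)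

-- ===== LEMMAS AND PROOFS =====

-- the fold computes filterMap id, with none exactly when that is empty
theorem pvFold_eq (xs : List (Option String)) : ∀ acc : Option (List String),
    xs.foldl pvKeepStep acc =
      match acc with
      | some l => some (l ++ xs.filterMap id)
      | none => if xs.filterMap id = [] then none else some (xs.filterMap id) := by
  induction xs with
  | nil => intro acc; cases acc <;> simp
  | cons h t ih =>
      intro acc
      cases h with
      | none => cases acc <;> simp [pvKeepStep, ih]
      | some s =>
          have hstep : pvKeepStep acc (some s) = some (acc.getD [] ++ [s]) := rfl
          cases acc <;> simp [List.foldl_cons, hstep, ih]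

theorem pv_filterMap_nil_iff (xs : List (Option String)) :
    xs.filterMap id = [] ↔ xs.all (fun elem => elem.isNone) = true := by
  induction xs with
  | nil => simp
  | cons h t ih =>
      cases h with
      | none => simpa using ih
      | some s => simp

-- ===== VERDICT (by name: the statement is the Claim_ definition above) =====
theorem get_origin_list_spec : Claim_equal_get_origin_list := by
  intro xs _
  unfold Spec_get_origin_list get_origin_list get_origin_list_alt
  rw [pvFold_eq xs none]
  by_cases hnil : xs = []
  · subst hnil; simp
  · simp only [if_neg hnil]
    by_cases hc : xs.contains none
    · simp only [hc, Bool.not_true]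
      by_cases hall : xs.all (fun elem => elem.isNone) = true
      · rw [if_neg (by simp), if_pos hall, if_pos ((pv_filterMap_nil_iff xs).2 hall)]
      · rw [if_neg (by simp), if_neg hall, if_neg (fun h => hall ((pv_filterMap_nil_iff xs).1 h))]
    · simp only [hc, Bool.not_false]
      rw [if_pos trivial, if_neg]
      intro h
      have hall := (pv_filterMap_nil_iff xs).1 h
      cases xs with
      | nil => exact hnil rfl
      | cons a t =>
          cases a with
          | none => simp at hc
          | some s => simp at hall
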